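-- pv_equiv track=rewrite | github.com/Tawana2000/Python | Python Intermediate Challenges/factorial-of-factorials.py | factorial_of_factorials
-- ===== SOURCE A (Python) =====
-- def factorial_of_factorials(n):
--
--     fact = 1
--     fact_fact = 1
--
--     if n < 0:
--         return "Input must be a positive number!"
--
--     for i in range(1, n + 1):
--         fact = fact * i
--         fact_fact *= fact
--
--     return fact_fact
-- ===== SOURCE B (Python) =====
-- def factorial_of_factorials(n):
--     if n < 0:
--         return "Input must be a positive number!"
--     result = 1
--     for i in range(1, n + 1):
--         # factor i appears in i!, (i+1)!, ..., n!  ->  exponent n - i + 1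
--         result *= i ** (n - i + 1)
--     return result
-- ===== Notes on version B (the rewrite author's own statement) =====
-- stated objective: alternative
-- what changed: Replaces the running-factorial accumulator pair with a single product of direct exponentiations i**(n-i+1), using the identity that factor i occurs in n-i+1 of the factorials.
-- outside the precondition, e.g. on factorial_of_factorials(-3): A returns 'Input must be a positive number!', B returns 'Input must be a positive number!'
import Mathlib
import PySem

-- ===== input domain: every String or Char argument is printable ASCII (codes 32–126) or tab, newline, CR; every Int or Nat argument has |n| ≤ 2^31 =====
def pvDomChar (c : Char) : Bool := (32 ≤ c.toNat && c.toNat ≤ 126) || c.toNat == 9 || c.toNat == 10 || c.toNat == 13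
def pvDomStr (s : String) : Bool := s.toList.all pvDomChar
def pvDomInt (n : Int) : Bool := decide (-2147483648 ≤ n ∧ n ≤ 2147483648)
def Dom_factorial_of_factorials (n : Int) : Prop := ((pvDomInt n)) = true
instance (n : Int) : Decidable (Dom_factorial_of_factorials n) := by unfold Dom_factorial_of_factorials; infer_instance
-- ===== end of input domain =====

-- B replaces A's running-factorial accumulator pair with one product of direct
-- exponentiations i^(n-i+1) (objective: alternative algorithm, same cost class).

-- ===== PORT A =====
-- loop over range(1, n+1) carrying the pair (fact, fact_fact)
def factorial_of_factorials (n : Int) : Int :=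
  ((PySem.List.pyRange 1 (n + 1) 1).foldl
    (fun (s : Int × Int) i => (s.1 * i, s.2 * (s.1 * i))) (1, 1)).2

-- ===== PORT B =====
-- i ** (n - i + 1): exponent is ≥ 1 for every i in range(1, n+1), so the
-- hand port via .toNat is exact on the loop's iterations.
def factorial_of_factorials_alt (n : Int) : Int :=
  (PySem.List.pyRange 1 (n + 1) 1).foldl
    (fun acc i => acc * i ^ (n - i + 1).toNat) 1

-- ===== PRECONDITION & SPEC =====
-- Pre_ excludes n < 0, where the Python A returns a STRING ("Input must be a
-- positive number!"), not an int of the declared return type.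
def Pre_factorial_of_factorials (n : Int) : Prop := 0 ≤ n
instance (n : Int) : Decidable (Pre_factorial_of_factorials n) := by unfold Pre_factorial_of_factorials; infer_instance
def pvWitness_factorial_of_factorials : Int := 5

def Spec_factorial_of_factorials (n : Int) (out : Int) : Prop := out = factorial_of_factorials_alt n
instance (n : Int) (out : Int) : Decidable (Spec_factorial_of_factorials n out) := by unfold Spec_factorial_of_factorials; infer_instance

-- ===== CLAIM (what is proved, stated in full; the proofs are below) =====
def Claim_equal_factorial_of_factorials : Prop := ∀ (n : Int), Dom_factorial_of_factorials n → Pre_factorial_of_factorials n → Spec_factorial_of_factorials n (factorial_of_factorials n)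

-- ===== LEMMAS AND PROOFS =====

-- canonical values: pvF m = m! , pvSF m = 1! * 2! * … * m!
def pvF (m : Nat) : Int := (Nat.factorial m : Int)
def pvSF : Nat → Int
  | 0 => 1
  | (m + 1) => pvSF m * pvF (m + 1)

theorem pvF_succ (m : Nat) : pvF (m + 1) = pvF m * ((m : Int) + 1) := by
  simp [pvF, Nat.factorial_succ]; ring

theorem lemA (m : Nat) :
    ((PySem.List.pyRange 1 ((m : Int) + 1) 1).foldl
      (fun (s : Int × Int) i => (s.1 * i, s.2 * (s.1 * i))) (1, 1)) = (pvF m, pvSF m) := by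
  induction m with
  | zero => simp [pvF, pvSF]
  | succ m ih =>
    have h : ((((m : Nat) + 1 : Nat) : Int) + 1) = ((m : Int) + 1) + 1 := by push_cast; ring
    rw [h, PySem.List.pyRange_one_succ_right (by omega), List.foldl_append, ih]
    simp [pvSF, pvF_succ]

theorem lemProd (m : Nat) :
    (PySem.List.pyRange 1 ((m : Int) + 1) 1).prod = pvF m := by
  induction m with
  | zero => simp [pvF]
  | succ m ih =>
    have h : ((((m : Nat) + 1 : Nat) : Int) + 1) = ((m : Int) + 1) + 1 := by push_cast; ring
    rw [h, PySem.List.pyRange_one_succ_right (by omega), List.prod_append, ih, pvF_succ]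
    simp

theorem lemB (m : Nat) :
    ((PySem.List.pyRange 1 ((m : Int) + 1) 1).map
      (fun i => i ^ ((m : Int) - i + 1).toNat)).prod = pvSF m := by
  induction m with
  | zero => simp [pvSF]
  | succ m ih =>
    have h : ((((m : Nat) + 1 : Nat) : Int) + 1) = ((m : Int) + 1) + 1 := by push_cast; ring
    rw [h, PySem.List.pyRange_one_succ_right (by omega), List.map_append, List.prod_append]
    have hlast : ((((m : Nat) + 1 : Nat) : Int) - ((m : Int) + 1) + 1).toNat = 1 := by
      push_cast; omega
    have hfront :
        ((PySem.List.pyRange 1 ((m : Int) + 1) 1).map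
          (fun i => i ^ ((((m : Nat) + 1 : Nat) : Int) - i + 1).toNat)).prod
        = pvSF m * pvF m := by
      have hcongr : ∀ i ∈ PySem.List.pyRange 1 ((m : Int) + 1) 1,
          i ^ ((((m : Nat) + 1 : Nat) : Int) - i + 1).toNat
            = i ^ ((m : Int) - i + 1).toNat * i := by
        intro i hi
        rw [PySem.List.mem_pyRange_one] at hi
        have he : ((((m : Nat) + 1 : Nat) : Int) - i + 1).toNat
            = ((m : Int) - i + 1).toNat + 1 := by push_cast; omega
        rw [he, pow_succ]
      rw [List.map_congr_left hcongr, List.prod_map_mul, ih]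
      have : ((PySem.List.pyRange 1 ((m : Int) + 1) 1).map fun i => i).prod = pvF m := by
        rw [List.map_id']; exact lemProd m
      rw [this]
    rw [hfront]
    simp [pvSF, pvF_succ]; ring

theorem foldl_mul_eq_prod_map (l : List Int) (f : Int → Int) :
    l.foldl (fun acc i => acc * f i) 1 = (l.map f).prod := by
  rw [List.prod_eq_foldl, List.foldl_map]

-- ===== VERDICT (by name: the statement is the Claim_ definition above) =====
theorem factorial_of_factorials_spec : Claim_equal_factorial_of_factorials := by
  intro n _ hPre
  unfold Spec_factorial_of_factorials factorial_of_factorials factorial_of_factorials_alt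
  have hn : n = ((n.toNat : Nat) : Int) := (Int.toNat_of_nonneg hPre).symm
  rw [hn, foldl_mul_eq_prod_map, lemB, lemA]
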